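-- pv_equiv track=rewrite | github.com/zfxsquare/paragon-clicker | src/paragon_clicker/d2core.py | get_rotated_pos
-- ===== SOURCE A (Python) =====
-- NODE_NUM = 21
--
-- def get_rotated_pos(row: int, col: int, rotate: int) -> dict[str, int]:
--     next_row = row
--     next_col = col
--     for _ in range(rotate):
--         previous_row = next_row
--         next_row = next_col
--         next_col = NODE_NUM - 1 - previous_row
--     return {"row": next_row, "col": next_col}
-- ===== SOURCE B (Python) =====
-- NODE_NUM = 21
--
-- def get_rotated_pos(row: int, col: int, rotate: int) -> dict[str, int]:
--     r = rotate % 4 if rotate > 0 else 0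
--     if r == 0:
--         nr, nc = row, col
--     elif r == 1:
--         nr, nc = col, NODE_NUM - 1 - row
--     elif r == 2:
--         nr, nc = NODE_NUM - 1 - row, NODE_NUM - 1 - col
--     else:
--         nr, nc = NODE_NUM - 1 - col, row
--     return {"row": nr, "col": nc}
-- ===== Notes on version B (the rewrite author's own statement) =====
-- stated objective: faster
-- what changed: Replaces the O(rotate) iteration loop with rotate%4 reduction and one of four closed-form 90-degree transforms.
import Mathlib
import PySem

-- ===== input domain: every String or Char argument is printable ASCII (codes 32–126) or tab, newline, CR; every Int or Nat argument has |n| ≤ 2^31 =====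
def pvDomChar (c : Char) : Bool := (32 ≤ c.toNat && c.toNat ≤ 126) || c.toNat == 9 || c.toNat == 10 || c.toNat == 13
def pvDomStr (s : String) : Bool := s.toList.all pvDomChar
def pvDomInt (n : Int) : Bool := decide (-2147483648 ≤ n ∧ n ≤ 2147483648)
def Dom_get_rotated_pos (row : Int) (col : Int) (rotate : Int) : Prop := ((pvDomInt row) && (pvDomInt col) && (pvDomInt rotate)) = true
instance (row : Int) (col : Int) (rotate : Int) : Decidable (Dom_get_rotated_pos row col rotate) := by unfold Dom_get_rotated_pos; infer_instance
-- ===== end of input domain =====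

-- B replaces A's O(rotate) rotation loop with rotate%4 and one of four closed-form transforms (objective: faster, asymptotic).

-- ===== PORT A =====
-- literal port of A: a loop over range(rotate) updating (next_row, next_col)
def get_rotated_pos (row : Int) (col : Int) (rotate : Int) : List (String × Int) :=
  let p := (PySem.List.pyRange 0 rotate 1).foldl
    (fun (s : Int × Int) _ => (s.2, 21 - 1 - s.1)) (row, col)
  [("row", p.1), ("col", p.2)]

-- ===== PORT B =====
-- literal port of B: reduce rotate mod 4, then one of four closed-form transforms
def get_rotated_pos_alt (row : Int) (col : Int) (rotate : Int) : List (String × Int) :=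
  let r : Int := if rotate > 0 then PySem.Int.mod rotate 4 else 0
  let p : Int × Int :=
    if r = 0 then (row, col)
    else if r = 1 then (col, 21 - 1 - row)
    else if r = 2 then (21 - 1 - row, 21 - 1 - col)
    else (21 - 1 - col, row)
  [("row", p.1), ("col", p.2)]

-- ===== PRECONDITION & SPEC =====
def Spec_get_rotated_pos (row : Int) (col : Int) (rotate : Int) (out : List (String × Int)) : Prop := out = get_rotated_pos_alt row col rotate
instance (row : Int) (col : Int) (rotate : Int) (out : List (String × Int)) : Decidable (Spec_get_rotated_pos row col rotate out) := by unfold Spec_get_rotated_pos; infer_instance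

-- ===== CLAIM (what is proved, stated in full; the proofs are below) =====
def Claim_equal_get_rotated_pos : Prop := ∀ (row : Int) (col : Int) (rotate : Int), Dom_get_rotated_pos row col rotate → Spec_get_rotated_pos row col rotate (get_rotated_pos row col rotate)

-- ===== LEMMAS AND PROOFS =====

-- the single rotation step of A's loop
def pvStep (s : Int × Int) : Int × Int := (s.2, 21 - 1 - s.1)

-- folding A's element-ignoring body over any list is iterating the step length-many times
theorem pvFoldl_eq_iterate (l : List Int) (s : Int × Int) :
    l.foldl (fun (s : Int × Int) _ => (s.2, 21 - 1 - s.1)) s = pvStep^[l.length] s := by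
  induction l generalizing s with
  | nil => rfl
  | cons a t ih =>
    rw [List.foldl_cons, ih, List.length_cons, Function.iterate_succ_apply]
    rfl

theorem pvStep_four (s : Int × Int) : pvStep^[4] s = s := by
  obtain ⟨a, b⟩ := s
  show pvStep (pvStep (pvStep (pvStep (a, b)))) = (a, b)
  simp [pvStep]

theorem pvStep_two (s : Int × Int) : pvStep^[2] s = (21 - 1 - s.1, 21 - 1 - s.2) := by
  show pvStep (pvStep s) = _
  simp [pvStep]

theorem pvStep_three (s : Int × Int) : pvStep^[3] s = (21 - 1 - s.2, s.1) := by
  show pvStep (pvStep (pvStep s)) = _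
  simp [pvStep]

theorem pvIterate_mod4 (n : Nat) (s : Int × Int) : pvStep^[n] s = pvStep^[n % 4] s := by
  induction n using Nat.strong_induction_on with
  | _ n ih =>
    by_cases h : n < 4
    · rw [Nat.mod_eq_of_lt h]
    · have h4 : n = (n - 4) + 4 := by omega
      rw [h4, Function.iterate_add_apply, pvStep_four, ih (n - 4) (by omega)]
      congr 1
      omega

-- ===== VERDICT (by name: the statement is the Claim_ definition above) =====
theorem get_rotated_pos_spec : Claim_equal_get_rotated_pos := by
  intro row col rotate _
  unfold Spec_get_rotated_pos get_rotated_pos get_rotated_pos_alt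
  rw [pvFoldl_eq_iterate, PySem.List.length_pyRange_one, pvIterate_mod4]
  by_cases hr : rotate > 0
  · rw [if_pos hr, PySem.Int.mod_eq_emod_of_pos (by omega)]
    have h0 : (rotate - 0).toNat % 4 = (rotate % 4).toNat := by omega
    rw [h0]
    have h4 : rotate % 4 = 0 ∨ rotate % 4 = 1 ∨ rotate % 4 = 2 ∨ rotate % 4 = 3 := by omega
    rcases h4 with h | h | h | h <;>
      norm_num [h, show Int.toNat 2 = 2 from rfl, show Int.toNat 3 = 3 from rfl, pvStep, pvStep_two, pvStep_three, Function.iterate_succ_apply]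
  · rw [if_neg hr]
    have h0 : (rotate - 0).toNat = 0 := by omega
    rw [h0]
    simp
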